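-- pv_equiv track=rewrite | github.com/Niccolum/dature | src/dature/source_locators/json_.py | _skip_to_value_start
-- ===== SOURCE A (Python) =====
-- def _skip_to_value_start(
--     content: str,
--     pos: int,
--     length: int,
--     current_line: int,
-- ) -> tuple[int, int]:
--     while pos < length and content[pos] != ":":
--         if content[pos] == "\n":
--             current_line += 1
--         pos += 1
--     if pos >= length:
--         return pos, current_line
--     pos += 1
--
--     while pos < length and content[pos] in " \t\r\n":
--         if content[pos] == "\n":
--             current_line += 1
--         pos += 1
--
--     return pos, current_line
-- ===== SOURCE B (Python) =====
-- def _skip_to_value_start(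
--     content: str,
--     pos: int,
--     length: int,
--     current_line: int,
-- ) -> tuple[int, int]:
--     if pos >= length:
--         return pos, current_line
--     idx = content.find(":", pos, length)
--     if idx == -1:
--         return length, current_line + content.count("\n", pos, length)
--     current_line += content.count("\n", pos, idx)
--     ws = content[idx + 1:length]
--     end = idx + 1 + (len(ws) - len(ws.lstrip(" \t\r\n")))
--     return end, current_line + content.count("\n", idx + 1, end)
-- ===== Notes on version B (the rewrite author's own statement) =====
-- stated objective: simpler
-- what changed: Replaces A's two character-at-a-time while loops (per-char newline bookkeeping) by boundary computations — str.find for the colon, lstrip length difference for the whitespace run — with str.count over the resulting spans for the line counter.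
-- outside the precondition, e.g. on _skip_to_value_start('a\n:', -2, 3, 0): A returns (0, 1), B returns (3, 1); on _skip_to_value_start(':', 0, 5, 0): A raises IndexError, B returns (1, 0); on _skip_to_value_start('x:y', 0, 9, 0): A returns (2, 0), B returns (2, 0)
import Mathlib
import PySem

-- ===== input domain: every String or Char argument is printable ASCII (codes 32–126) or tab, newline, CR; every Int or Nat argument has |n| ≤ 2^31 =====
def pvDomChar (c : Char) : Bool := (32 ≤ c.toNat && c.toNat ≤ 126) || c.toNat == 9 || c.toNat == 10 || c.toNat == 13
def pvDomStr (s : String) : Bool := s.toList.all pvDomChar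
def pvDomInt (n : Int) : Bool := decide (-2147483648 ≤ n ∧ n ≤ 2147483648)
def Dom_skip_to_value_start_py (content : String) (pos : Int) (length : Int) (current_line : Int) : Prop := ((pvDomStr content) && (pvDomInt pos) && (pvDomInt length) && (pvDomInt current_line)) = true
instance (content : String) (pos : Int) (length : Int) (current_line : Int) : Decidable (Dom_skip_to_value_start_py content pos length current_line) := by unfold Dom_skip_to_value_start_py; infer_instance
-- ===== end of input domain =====

-- B replaces A's two character-at-a-time while loops by boundary computations
-- (find the colon, strip the leading whitespace run) plus newline counts over the two spans (objective: simpler).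

-- ===== PORT A =====
-- first while loop: 'while pos < length and content[pos] != ":"'
def pvSkipA1 (cs : List Char) (pos : Int) (length : Int) (cur : Int) : Int × Int :=
  if _h : pos < length then
    match PySem.List.pyGet? cs pos with
    | none => (pos, cur)  -- Python raises IndexError here; outside Pre_
    | some c =>
      if c == ':' then (pos, cur)
      else pvSkipA1 cs (pos + 1) length (if c == '\n' then cur + 1 else cur)
  else (pos, cur)
termination_by (length - pos).toNat
decreasing_by omega

-- second while loop: 'while pos < length and content[pos] in " \t\r\n"'
def pvSkipA2 (cs : List Char) (pos : Int) (length : Int) (cur : Int) : Int × Int :=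
  if _h : pos < length then
    match PySem.List.pyGet? cs pos with
    | none => (pos, cur)  -- Python raises IndexError here; outside Pre_
    | some c =>
      if c == ' ' || c == '\t' || c == '\r' || c == '\n' then
        pvSkipA2 cs (pos + 1) length (if c == '\n' then cur + 1 else cur)
      else (pos, cur)
  else (pos, cur)
termination_by (length - pos).toNat
decreasing_by omega

def skip_to_value_start_py (content : String) (pos : Int) (length : Int) (current_line : Int) : Int × Int :=
  let cs := content.toList
  let r := pvSkipA1 cs pos length current_line
  if r.1 ≥ length then r
  else pvSkipA2 cs (r.1 + 1) length r.2

-- ===== PORT B =====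
def pvWsChar (c : Char) : Bool := c == ' ' || c == '\t' || c == '\r' || c == '\n'

def skip_to_value_start_py_alt (content : String) (pos : Int) (length : Int) (current_line : Int) : Int × Int :=
  let cs := content.toList
  if pos ≥ length then (pos, current_line)
  else
    -- content.find(":", pos, length): first ':' of content[pos:length] as an index into content (-1 if
    -- absent); Python reads start/end as clamped slice bounds, hence clampIdx for the absolute index
    match (PySem.List.slice cs (some pos) (some length)).findIdx? (· == ':') with
    | none =>
      -- content.count("\n", pos, length) counts the '\n' chars of content[pos:length]
      (length, current_line + ((PySem.List.slice cs (some pos) (some length)).count '\n' : Int))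
    | some i =>
      let idx := (PySem.List.clampIdx cs.length pos : Int) + (i : Int)
      let cur := current_line + ((PySem.List.slice cs (some pos) (some idx)).count '\n' : Int)
      let ws := PySem.List.slice cs (some (idx + 1)) (some length)              -- content[idx+1:length]
      -- len(ws) - len(ws.lstrip(" \t\r\n")): lstrip removes the leading run of those chars
      let endPos := idx + 1 + ((ws.length : Int) - ((ws.dropWhile pvWsChar).length : Int))
      (endPos, cur + ((PySem.List.slice cs (some (idx + 1)) (some endPos)).count '\n' : Int))

-- ===== PRECONDITION & SPEC =====
-- Pre_ admits the trivial inputs with pos >= length (A returns at once) and, when pos < length, requires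
-- 0 <= pos and length <= len(content), i.e. every index A scans is a genuine index of content.
-- Excluded inputs on which A still returns: pos < 0 < length, where Python's negative-index wraparound makes A
-- scan wrapped characters (a corner no caller would specify, where A's and B's values legitimately disagree);
-- and length > len(content), where A either raises IndexError or happens to stop inside the string.
def Pre_skip_to_value_start_py (content : String) (pos : Int) (length : Int) (current_line : Int) : Prop :=
  length ≤ pos ∨ (0 ≤ pos ∧ length ≤ (content.toList.length : Int))
instance (content : String) (pos : Int) (length : Int) (current_line : Int) : Decidable (Pre_skip_to_value_start_py content pos length current_line) := by unfold Pre_skip_to_value_start_py; infer_instance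

def pvWitness_skip_to_value_start_py : String × Int × Int × Int := ("a: b", 0, 4, 1)

def Spec_skip_to_value_start_py (content : String) (pos : Int) (length : Int) (current_line : Int) (out : Int × Int) : Prop := out = skip_to_value_start_py_alt content pos length current_line
instance (content : String) (pos : Int) (length : Int) (current_line : Int) (out : Int × Int) : Decidable (Spec_skip_to_value_start_py content pos length current_line out) := by unfold Spec_skip_to_value_start_py; infer_instance

-- ===== CLAIM (what is proved, stated in full; the proofs are below) =====
def Claim_equal_skip_to_value_start_py : Prop := ∀ (content : String) (pos : Int) (length : Int) (current_line : Int), Dom_skip_to_value_start_py content pos length current_line → Pre_skip_to_value_start_py content pos length current_line → Spec_skip_to_value_start_py content pos length current_line (skip_to_value_start_py content pos length current_line)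

-- ===== LEMMAS AND PROOFS =====

-- list-level recursions equivalent to A's two loops on in-range spans
def pvRun1 : List Char → Int → Int → Int × Int
  | [], p, c => (p, c)
  | ch :: t, p, c =>
    if ch == ':' then (p, c) else pvRun1 t (p + 1) (if ch == '\n' then c + 1 else c)

def pvRun2 : List Char → Int → Int → Int × Int
  | [], p, c => (p, c)
  | ch :: t, p, c =>
    if pvWsChar ch then pvRun2 t (p + 1) (if ch == '\n' then c + 1 else c) else (p, c)

theorem pvSkipA1_eq_run1 (cs : List Char) (pos length cur : Int) (h0 : 0 ≤ pos)
    (hl : length ≤ (cs.length : Int)) :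
    pvSkipA1 cs pos length cur = pvRun1 ((cs.drop pos.toNat).take (length - pos).toNat) pos cur := by
  generalize hn : (length - pos).toNat = n
  induction n generalizing pos cur with
  | zero =>
    have h : ¬ pos < length := by omega
    rw [pvSkipA1, dif_neg h]
    simp [pvRun1]
  | succ n ih =>
    have hpl : pos < length := by omega
    have hlt : pos.toNat < cs.length := by omega
    have hget : PySem.List.pyGet? cs pos = some cs[pos.toNat] := by
      rw [PySem.List.pyGet?_of_nonneg _ h0, List.getElem?_eq_getElem hlt]
    have hdrop : cs.drop pos.toNat = cs[pos.toNat] :: cs.drop (pos.toNat + 1) :=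
      List.drop_eq_getElem_cons hlt
    rw [pvSkipA1, dif_pos hpl, hget, hdrop, List.take_succ_cons, pvRun1]
    dsimp only
    by_cases hc : cs[pos.toNat] = ':'
    · simp [hc]
    · have hcb : (cs[pos.toNat] == ':') = false := by simpa using hc
      rw [hcb]
      simp only [Bool.false_eq_true, if_false]
      have h1 : (pos + 1).toNat = pos.toNat + 1 := by omega
      rw [ih (pos + 1) _ (by omega) (by omega), h1]

theorem pvSkipA2_eq_run2 (cs : List Char) (pos length cur : Int) (h0 : 0 ≤ pos)
    (hl : length ≤ (cs.length : Int)) :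
    pvSkipA2 cs pos length cur = pvRun2 ((cs.drop pos.toNat).take (length - pos).toNat) pos cur := by
  generalize hn : (length - pos).toNat = n
  induction n generalizing pos cur with
  | zero =>
    have h : ¬ pos < length := by omega
    rw [pvSkipA2, dif_neg h]
    simp [pvRun2]
  | succ n ih =>
    have hpl : pos < length := by omega
    have hlt : pos.toNat < cs.length := by omega
    have hget : PySem.List.pyGet? cs pos = some cs[pos.toNat] := by
      rw [PySem.List.pyGet?_of_nonneg _ h0, List.getElem?_eq_getElem hlt]
    have hdrop : cs.drop pos.toNat = cs[pos.toNat] :: cs.drop (pos.toNat + 1) :=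
      List.drop_eq_getElem_cons hlt
    rw [pvSkipA2, dif_pos hpl, hget, hdrop, List.take_succ_cons, pvRun2]
    dsimp only
    have hws : (cs[pos.toNat] == ' ' || cs[pos.toNat] == '\t' || cs[pos.toNat] == '\r' || cs[pos.toNat] == '\n')
        = pvWsChar cs[pos.toNat] := by
      simp [pvWsChar]
    rw [hws]
    by_cases hw : pvWsChar cs[pos.toNat]
    · rw [if_pos hw, if_pos hw]
      have h1 : (pos + 1).toNat = pos.toNat + 1 := by omega
      rw [ih (pos + 1) _ (by omega) (by omega), h1]
    · rw [if_neg (by simpa using hw), if_neg (by simpa using hw)]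

theorem pvRun1_eq (l : List Char) (p c : Int) :
    pvRun1 l p c =
      match l.findIdx? (· == ':') with
      | none => (p + (l.length : Int), c + (l.count '\n' : Int))
      | some i => (p + (i : Int), c + ((l.take i).count '\n' : Int)) := by
  induction l generalizing p c with
  | nil => simp [pvRun1]
  | cons ch t ih =>
    by_cases hc : ch = ':'
    · subst hc; simp [pvRun1, List.findIdx?_cons]
    · rw [pvRun1, if_neg (by simpa using hc)]
      rw [ih]
      simp only [List.findIdx?_cons, beq_iff_eq, if_neg hc]
      cases h : t.findIdx? (· == ':') with
      | none =>
        simp only [Option.map_none]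
        by_cases hn : ch = '\n' <;> simp [hn, Prod.ext_iff] <;> push_cast <;> omega
      | some j =>
        simp only [Option.map_some]
        by_cases hn : ch = '\n' <;> simp [hn, List.take_succ_cons, Prod.ext_iff] <;> push_cast <;> omega

theorem pvRun2_eq (l : List Char) (p c : Int) :
    pvRun2 l p c = (p + ((l.takeWhile pvWsChar).length : Int), c + ((l.takeWhile pvWsChar).count '\n' : Int)) := by
  induction l generalizing p c with
  | nil => simp [pvRun2]
  | cons ch t ih =>
    by_cases hw : pvWsChar ch
    · rw [pvRun2, if_pos hw, ih]
      have htw : List.takeWhile pvWsChar (ch :: t) = ch :: List.takeWhile pvWsChar t := by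
        simp [List.takeWhile_cons, hw]
      rw [htw]
      by_cases hn : ch = '\n' <;> simp [hn, List.count_cons, Prod.ext_iff] <;> push_cast <;> omega
    · rw [pvRun2, if_neg hw]
      simp [List.takeWhile_cons, hw]

-- ===== VERDICT (by name: the statement is the Claim_ definition above) =====
theorem skip_to_value_start_py_spec : Claim_equal_skip_to_value_start_py := by
  intro content pos length current_line _hdom hpre
  unfold Spec_skip_to_value_start_py skip_to_value_start_py skip_to_value_start_py_alt
  dsimp only
  by_cases hpl : pos ≥ length
  · rw [pvSkipA1, dif_neg (by omega)]
    simp [hpl]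
  · have h0 : 0 ≤ pos := by rcases hpre with h | ⟨h, _⟩ <;> omega
    have hlen : length ≤ (content.toList.length : Int) := by
      rcases hpre with h | ⟨_, h⟩
      · omega
      · exact h
    rw [if_neg hpl]
    set cs := content.toList with hcs
    have hsub : PySem.List.slice cs (some pos) (some length)
        = (cs.drop pos.toNat).take (length - pos).toNat := by
      rw [PySem.List.slice_toNat _ h0 (by omega)]
      congr 1
      omega
    set sub := (cs.drop pos.toNat).take (length - pos).toNat with hsubdef
    have hsublen : sub.length = (length - pos).toNat := by
      simp [hsubdef]
      omega
    rw [pvSkipA1_eq_run1 cs pos length current_line h0 hlen, pvRun1_eq, hsub]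
    cases hidx : sub.findIdx? (· == ':') with
    | none =>
      have hfst : pos + (sub.length : Int) = length := by omega
      rw [hfst, if_pos (le_refl length)]
    | some i =>
      have hilt : i < sub.length := by
        have := List.findIdx?_eq_some_iff_findIdx_eq.mp hidx
        omega
      have hi : (i : Int) < length - pos := by omega
      simp only [if_neg (show ¬ pos + (i : Int) ≥ length by omega)]
      -- the two scans of the whitespace run coincide
      have hclamp : ((PySem.List.clampIdx cs.length pos : Nat) : Int) = pos := by
        unfold PySem.List.clampIdx
        split <;> omega
      rw [hclamp]
      have hq0 : (0 : Int) ≤ pos + i + 1 := by omega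
      rw [pvSkipA2_eq_run2 cs (pos + (i : Int) + 1) length _ hq0 hlen, pvRun2_eq]
      set q : Int := pos + (i : Int) + 1 with hqdef
      have hqn : q.toNat = pos.toNat + i + 1 := by omega
      set l2 := (cs.drop q.toNat).take (length - q).toNat with hl2def
      have hws : PySem.List.slice cs (some (pos + (i : Int) + 1)) (some length) = l2 := by
        rw [PySem.List.slice_toNat _ hq0 (by omega)]
        congr 1
        omega
      set tw := l2.takeWhile pvWsChar with htwdef
      have htwle : tw.length ≤ l2.length := by
        simpa [htwdef] using (List.takeWhile_prefix (l := l2) pvWsChar).length_le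
      have hl2len : l2.length = (length - q).toNat := by
        simp [hl2def]
        omega
      have hdropw : (l2.length : Int) - ((l2.dropWhile pvWsChar).length : Int) = (tw.length : Int) := by
        have := congrArg List.length (List.takeWhile_append_dropWhile (p := pvWsChar) (l := l2))
        simp only [List.length_append] at this
        rw [← htwdef] at this
        omega
      have htake : PySem.List.slice cs (some pos) (some (pos + (i : Int))) = sub.take i := by
        rw [PySem.List.slice_toNat _ h0 (by omega), hsubdef, List.take_take]
        congr 1
        omega
      have hpref : tw = l2.take tw.length := List.prefix_iff_eq_take.mp (List.takeWhile_prefix _)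
      have hpref' : tw = List.take tw.length (List.drop q.toNat cs) := by
        rw [hl2def, List.take_take, show min tw.length (length - q).toNat = tw.length by omega] at hpref
        exact hpref
      have hlast : PySem.List.slice cs (some (pos + (i : Int) + 1))
          (some (pos + (i : Int) + 1 + ((l2.length : Int) - ((l2.dropWhile pvWsChar).length : Int))))
          = tw := by
        rw [hdropw, PySem.List.slice_toNat _ hq0 (by omega)]
        have h1 : ((pos + (i : Int) + 1 + (tw.length : Int)).toNat - (pos + (i : Int) + 1).toNat) = tw.length := by
          omega
        rw [h1, ← hpref']
      rw [hws, htake, hlast]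
      simp only [Prod.mk.injEq]
      constructor
      · omega
      · push_cast
        ring
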